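-- pv_equiv track=rewrite | github.com/orionsamuel/deafio-python-01 | balanceamento.py | remove_user
-- ===== SOURCE A (Python) =====
-- def remove_user(qtd_users, servers):
--     i = 0
--     while len(servers) > 0:
--         if qtd_users < servers[i]:
--             servers[i] = servers[i] - qtd_users
--             return servers
--         elif qtd_users == servers[i]:
--             del servers[i]
--             return servers
--         else:
--             qtd_users -= servers[i]
--             del servers[i]
--             i -= 1
--         i += 1
--     return servers
-- ===== SOURCE B (Python) =====
-- def remove_user(qtd_users, servers):
--     rem = qtd_users
--     for j, s in enumerate(servers):
--         if rem <= s: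
--             rest = servers[j + 1:]
--             servers[:] = rest if rem == s else [s - rem] + rest
--             return servers
--         rem -= s
--     servers[:] = []
--     return servers
-- ===== Notes on version B (the rewrite author's own statement) =====
-- stated objective: alternative
-- what changed: Replaces A's destructive loop that repeatedly deletes the front element of the list with a non-destructive single pass keeping a running remainder over an enumerate, finishing with one slice past the cutoff server.
import Mathlib
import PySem

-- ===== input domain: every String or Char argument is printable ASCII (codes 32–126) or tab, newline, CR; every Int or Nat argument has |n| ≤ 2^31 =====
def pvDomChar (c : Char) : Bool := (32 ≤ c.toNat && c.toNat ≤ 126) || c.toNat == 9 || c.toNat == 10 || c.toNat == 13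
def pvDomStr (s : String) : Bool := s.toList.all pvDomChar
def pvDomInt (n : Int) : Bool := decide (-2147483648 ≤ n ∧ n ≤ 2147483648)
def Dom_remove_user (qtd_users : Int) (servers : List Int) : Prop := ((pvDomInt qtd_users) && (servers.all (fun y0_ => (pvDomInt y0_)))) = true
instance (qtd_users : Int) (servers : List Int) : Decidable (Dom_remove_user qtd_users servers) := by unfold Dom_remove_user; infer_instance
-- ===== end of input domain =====

-- B replaces A's destructive repeated front-deletion with a non-destructive pass (running remainder) and a
-- single slice; both mutate `servers` in Python so that it equals the returned list — the theorems are about the return value.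
-- ===== PORT A =====
-- A's loop always inspects index 0 (the else branch does i -= 1; i += 1), so `del servers[i]` is `del servers[0]`:
-- the while loop is structural recursion on the front of the list.
def remove_user (qtd_users : Int) (servers : List Int) : List Int :=
  match servers with
  | [] => []
  | s :: rest =>
    if qtd_users < s then (s - qtd_users) :: rest
    else if qtd_users = s then rest
    else remove_user (qtd_users - s) rest

-- ===== PORT B =====
-- the `for j, s in enumerate(servers)` loop of Source B: `xs` is the suffix being iterated, `j` the enumerate index;
-- `servers[j+1:]` (slice with a nonnegative start) is `servers.drop (j+1)`.
def remove_user_alt_go (rem : Int) (j : Nat) (xs : List Int) (servers : List Int) : List Int :=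
  match xs with
  | [] => []
  | s :: t =>
    if rem ≤ s then
      let rest := servers.drop (j + 1)
      if rem = s then rest else (s - rem) :: rest
    else remove_user_alt_go (rem - s) (j + 1) t servers

def remove_user_alt (qtd_users : Int) (servers : List Int) : List Int :=
  remove_user_alt_go qtd_users 0 servers servers

-- ===== PRECONDITION & SPEC =====
def Spec_remove_user (qtd_users : Int) (servers : List Int) (out : List Int) : Prop := out = remove_user_alt qtd_users servers
instance (qtd_users : Int) (servers : List Int) (out : List Int) : Decidable (Spec_remove_user qtd_users servers out) := by unfold Spec_remove_user; infer_instance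

-- ===== CLAIM (what is proved, stated in full; the proofs are below) =====
def Claim_equal_remove_user : Prop := ∀ (qtd_users : Int) (servers : List Int), Dom_remove_user qtd_users servers → Spec_remove_user qtd_users servers (remove_user qtd_users servers)

-- ===== LEMMAS AND PROOFS =====

-- ===== VERDICT (by name: the statement is the Claim_ definition above) =====
-- loop invariant: while B's loop walks the enumerated suffix `xs` of `servers` (xs = servers.drop j),
-- it computes exactly what A computes on that suffix.
theorem remove_user_alt_go_eq (xs : List Int) : ∀ (j : Nat) (servers : List Int) (q : Int),
    servers.drop j = xs → remove_user_alt_go q j xs servers = remove_user q xs := by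
  induction xs with
  | nil => intro j servers q h; simp [remove_user_alt_go, remove_user]
  | cons s t ih =>
    intro j servers q h
    have hdrop : servers.drop (j + 1) = t := by
      have h2 := congrArg (List.drop 1) h
      simpa [List.drop_drop, Nat.add_comm] using h2
    by_cases hle : q ≤ s
    · rcases lt_or_eq_of_le hle with hlt | heq
      · simp [remove_user_alt_go, remove_user, hle, hlt, hdrop, ne_of_lt hlt]
      · simp [remove_user_alt_go, remove_user, heq, hdrop]
    · have hlt : s < q := lt_of_not_ge hle
      simp [remove_user_alt_go, remove_user, hle, not_lt_of_gt hlt, (ne_of_lt hlt).symm]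
      exact ih (j + 1) servers (q - s) hdrop

theorem remove_user_spec : Claim_equal_remove_user := by
  intro q servers _
  unfold Spec_remove_user remove_user_alt
  exact (remove_user_alt_go_eq servers 0 servers q (by simp)).symm
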